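-- pv_equiv track=rewrite | github.com/cataratoru-fara-cap/aoc | aoc 2024/7/7.py | valid_eq
-- ===== SOURCE A (Python) =====
-- def valid_eq(test_value: int, numbers: list[int]) -> int:
--     results = [numbers[0]]
--     for num in numbers[1:]:
--         temp = []
--         for result in results:
--             temp.append(result + num)
--             temp.append(result * num)
--             # only line for part two
--             # temp.append(int(f"{result}{num}"))
--         results = temp
--
--     if test_value in results:
--         return test_value
--     return 0
-- ===== SOURCE B (Python) =====
-- # Backward search: peel numbers off the right; subtract always, divide only
-- # when it is exact -- prunes the tree instead of enumerating all 2^(n-1) results.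
-- def valid_eq(test_value: int, numbers: list[int]) -> int:
--     first = numbers[0]
--     def ok(rev: list, t: int) -> bool:
--         if not rev:
--             return t == first
--         y, rest = rev[0], rev[1:]
--         if ok(rest, t - y):
--             return True
--         if y == 0:
--             return t == 0
--         return t % y == 0 and ok(rest, t // y)
--     return test_value if ok(numbers[:0:-1], test_value) else 0
-- ===== Notes on version B (the rewrite author's own statement) =====
-- stated objective: faster
-- what changed: Replaces A's forward enumeration of all 2^(n-1) operator outcomes with a backward recursive search from the target that always tries subtraction but tries division only when it divides exactly, returning at the first success.
import Mathlib
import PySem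

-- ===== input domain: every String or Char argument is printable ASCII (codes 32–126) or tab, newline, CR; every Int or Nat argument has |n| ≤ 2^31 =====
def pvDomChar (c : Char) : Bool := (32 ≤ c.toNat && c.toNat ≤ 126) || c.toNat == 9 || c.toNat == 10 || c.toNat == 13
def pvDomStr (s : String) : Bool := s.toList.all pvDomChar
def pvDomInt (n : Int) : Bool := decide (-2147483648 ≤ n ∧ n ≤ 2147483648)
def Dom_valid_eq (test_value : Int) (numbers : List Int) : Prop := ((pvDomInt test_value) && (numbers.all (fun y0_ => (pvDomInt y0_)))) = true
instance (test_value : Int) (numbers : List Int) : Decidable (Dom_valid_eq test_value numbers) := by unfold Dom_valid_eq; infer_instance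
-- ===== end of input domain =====

-- B replaces A's forward enumeration of all 2^(n-1) operator results by a backward
-- search from the target (subtract always, divide only when exact), pruning heavily.

-- ===== PORT A =====
-- results = [numbers[0]]; for num in numbers[1:]: temp = []; for result in results: append r+num, r*num
def valid_eq (test_value : Int) (numbers : List Int) : Int :=
  match numbers with
  | [] => 0  -- Python raises IndexError on numbers[0]; excluded by Pre_
  | x :: rest =>
    let results := rest.foldl
      (fun results num =>
        results.foldl (fun temp result => temp ++ [result + num, result * num]) [])
      [x]
    if test_value ∈ results then test_value else 0

-- ===== PORT B =====
-- ok(rev, t): rev is numbers[1:] reversed; peel the last operand y off, try t-y, then exact division t//y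
def validEqAltOk (first : Int) (rev : List Int) (t : Int) : Bool :=
  match rev with
  | [] => decide (t = first)
  | y :: rest =>
    if validEqAltOk first rest (t - y) then true
    else if y = 0 then decide (t = 0)
    else decide (PySem.Int.mod t y = 0) && validEqAltOk first rest (PySem.Int.floordiv t y)

def valid_eq_alt (test_value : Int) (numbers : List Int) : Int :=
  match numbers with
  | [] => 0  -- Python raises IndexError; excluded by Pre_
  | x :: rest =>
    if validEqAltOk x rest.reverse test_value then test_value else 0

-- ===== PRECONDITION & SPEC =====
-- Both Pythons raise IndexError on the empty list (numbers[0]); Pre_ excludes it.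
def Pre_valid_eq (test_value : Int) (numbers : List Int) : Prop := numbers ≠ []
instance (test_value : Int) (numbers : List Int) : Decidable (Pre_valid_eq test_value numbers) := by unfold Pre_valid_eq; infer_instance
def pvWitness_valid_eq : Int × List Int := (10, [2, 3, 4])

def Spec_valid_eq (test_value : Int) (numbers : List Int) (out : Int) : Prop := out = valid_eq_alt test_value numbers
instance (test_value : Int) (numbers : List Int) (out : Int) : Decidable (Spec_valid_eq test_value numbers out) := by unfold Spec_valid_eq; infer_instance

-- ===== CLAIM (what is proved, stated in full; the proofs are below) =====
def Claim_equal_valid_eq : Prop := ∀ (test_value : Int) (numbers : List Int), Dom_valid_eq test_value numbers → Pre_valid_eq test_value numbers → Spec_valid_eq test_value numbers (valid_eq test_value numbers)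

-- ===== LEMMAS AND PROOFS =====

-- A's inner loop over one step equals a flatMap
theorem pvStep_eq (rs : List Int) (y : Int) (acc : List Int) :
    rs.foldl (fun temp result => temp ++ [result + y, result * y]) acc
      = acc ++ rs.flatMap (fun r => [r + y, r * y]) := by
  induction rs generalizing acc with
  | nil => simp
  | cons r rs ih => simp [List.foldl_cons, ih]

theorem pvResults_ne_nil (l : List Int) (rs : List Int) (h : rs ≠ []) :
    l.foldl (fun results num =>
        results.foldl (fun temp result => temp ++ [result + num, result * num]) []) rs ≠ [] := by
  induction l generalizing rs with
  | nil => exact h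
  | cons y l ih =>
    refine ih _ ?_
    show rs.foldl (fun temp result => temp ++ [result + y, result * y]) [] ≠ []
    rw [pvStep_eq]
    cases rs with
    | nil => exact absurd rfl h
    | cons a as => simp

theorem pvExactDiv {t y : Int} (_hy : y ≠ 0) (hm : PySem.Int.mod t y = 0) :
    PySem.Int.floordiv t y * y = t := by
  have h := PySem.Int.floordiv_mul_add_mod t y
  omega

-- one forward step, as a membership statement
theorem pvMem_step (rs : List Int) (y s : Int) :
    s ∈ rs.foldl (fun temp result => temp ++ [result + y, result * y]) []
      ↔ ∃ r ∈ rs, s = r + y ∨ s = r * y := by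
  rw [pvStep_eq, List.nil_append]
  simp only [List.mem_flatMap, List.mem_cons, List.not_mem_nil, or_false]

-- core: backward ok ⟺ target is a member of A's forward result list
theorem pvOk_iff (x : Int) (rev : List Int) (t : Int) :
    validEqAltOk x rev t = true ↔
      t ∈ rev.reverse.foldl
        (fun results num =>
          results.foldl (fun temp result => temp ++ [result + num, result * num]) [])
        [x] := by
  induction rev generalizing t with
  | nil => simp [validEqAltOk]
  | cons y rest ih =>
    have hne := pvResults_ne_nil rest.reverse [x] (by simp)
    have hsplit : (List.reverse (y :: rest)).foldl
        (fun results num =>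
          results.foldl (fun temp result => temp ++ [result + num, result * num]) [])
        [x]
      = (rest.reverse.foldl
          (fun results num =>
            results.foldl (fun temp result => temp ++ [result + num, result * num]) [])
          [x]).foldl (fun temp result => temp ++ [result + y, result * y]) [] := by
      rw [List.reverse_cons, List.foldl_append]; rfl
    rw [hsplit, pvMem_step]
    simp only [validEqAltOk]
    by_cases h1 : validEqAltOk x rest (t - y) = true
    · rw [if_pos h1]
      simp only [true_iff]
      exact ⟨t - y, (ih (t - y)).mp h1, Or.inl (by ring)⟩
    · rw [if_neg h1]
      by_cases hy : y = 0
      · subst hy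
        rw [if_pos rfl]
        simp only [decide_eq_true_eq]
        constructor
        · intro ht
          obtain ⟨r, hr⟩ := List.exists_mem_of_ne_nil _ hne
          exact ⟨r, hr, Or.inr (by simp [ht])⟩
        · rintro ⟨r, hr, h | h⟩
          · refine absurd ((ih (t - 0)).mpr ?_) h1
            have : t - 0 = r := by omega
            rwa [this]
          · simpa using h
      · rw [if_neg hy]
        simp only [Bool.and_eq_true, decide_eq_true_eq]
        constructor
        · rintro ⟨hm, hok⟩
          exact ⟨PySem.Int.floordiv t y, (ih _).mp hok, Or.inr (pvExactDiv hy hm).symm⟩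
        · rintro ⟨r, hr, h | h⟩
          · refine absurd ((ih (t - y)).mpr ?_) h1
            have : t - y = r := by omega
            rwa [this]
          · have hm : PySem.Int.mod t y = 0 := by
              rw [h]; simp [PySem.Int.mod]
            refine ⟨hm, (ih _).mpr ?_⟩
            have heq : PySem.Int.floordiv t y = r := by
              rw [h]; simp [PySem.Int.floordiv, Int.mul_fdiv_cancel _ hy]
            rwa [heq]

-- ===== VERDICT (by name: the statement is the Claim_ definition above) =====
theorem valid_eq_spec : Claim_equal_valid_eq := by
  intro tv numbers _ hpre
  unfold Spec_valid_eq valid_eq valid_eq_alt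
  cases numbers with
  | nil => exact absurd rfl hpre
  | cons x rest =>
    simp only
    have hio := pvOk_iff x rest.reverse tv
    rw [List.reverse_reverse] at hio
    by_cases h : validEqAltOk x rest.reverse tv = true
    · rw [if_pos (hio.mp h), if_pos h]
    · rw [if_neg (fun hmem => h (hio.mpr hmem)), if_neg h]
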